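-- pv_equiv track=rewrite | github.com/Pixlox/SEN11-Solutions | T1/recamans-novice.py | recamanSequence
-- ===== SOURCE A (Python) =====
-- def recamanSequence(N):
--     if N <= 0:
--         return [], []
--
--     sequence = [0] * N
--     sequence[0] = 1
--     seen = {1}
--     repeated = set()
--
--     for n in range(2, N + 1):
--         A = sequence[n - 2] - n
--         if A > 0 and A not in seen:
--             sequence[n - 1] = A
--         else:
--             sequence[n - 1] = sequence[n - 2] + n
--         if sequence[n - 1] in seen:
--             repeated.add(sequence[n - 1])
--         seen.add(sequence[n - 1])
--
--     return sequence, repeated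
-- ===== SOURCE B (Python) =====
-- def recamanSequence(N):
--     if N <= 0:
--         return [], []
--     # generate by appending, tracking only the previous term
--     sequence = [1]
--     seen = {1}
--     prev = 1
--     for n in range(2, N + 1):
--         cand = prev - n
--         prev = cand if cand > 0 and cand not in seen else prev + n
--         sequence.append(prev)
--         seen.add(prev)
--     # tally repeats in a separate pass over the finished sequence
--     counts = {}
--     repeated = set()
--     for v in sequence:
--         c = counts.get(v, 0) + 1
--         counts[v] = c
--         if c == 2:
--             repeated.add(v)
--     return sequence, repeated
-- ===== Notes on version B (the rewrite author's own statement) =====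
-- stated objective: alternative
-- what changed: A fills a preallocated array by index arithmetic and fuses repeat-tracking into the generation loop; B builds the sequence by appending while tracking only the previous term, and computes the repeated set afterwards in a separate counting pass over the finished sequence.
import Mathlib
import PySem

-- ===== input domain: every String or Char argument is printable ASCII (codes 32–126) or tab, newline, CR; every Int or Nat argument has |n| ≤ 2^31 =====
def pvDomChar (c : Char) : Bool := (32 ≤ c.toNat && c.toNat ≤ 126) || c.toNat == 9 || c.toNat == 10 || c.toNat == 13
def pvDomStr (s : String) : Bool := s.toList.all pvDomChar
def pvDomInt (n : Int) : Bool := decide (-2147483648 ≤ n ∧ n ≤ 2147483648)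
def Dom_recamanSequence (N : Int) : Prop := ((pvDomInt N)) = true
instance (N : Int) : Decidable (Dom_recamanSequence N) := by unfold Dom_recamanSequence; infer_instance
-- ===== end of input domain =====

-- B restructures A: A fills a preallocated array by index arithmetic with repeat-tracking
-- fused into the generation loop; B appends to a growing list tracking only the previous
-- term and tallies the repeated values in a separate counting pass afterwards (alternative
-- decomposition, same O(N) cost).

-- ===== PORT A =====
-- loop body of A: state = (sequence, seen, repeated)
def stepA (st : List Int × PySem.Set Int × PySem.Set Int) (n : Int) :
    List Int × PySem.Set Int × PySem.Set Int :=
  let A := PySem.List.pyGetD st.1 (n - 2) 0 - n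
  let seq :=
    if A > 0 ∧ ¬ (PySem.Set.contains st.2.1 A = true) then
      PySem.List.pySetD st.1 (n - 1) A
    else
      PySem.List.pySetD st.1 (n - 1) (PySem.List.pyGetD st.1 (n - 2) 0 + n)
  let v := PySem.List.pyGetD seq (n - 1) 0
  (seq, PySem.Set.add st.2.1 v,
    if PySem.Set.contains st.2.1 v = true then PySem.Set.add st.2.2 v else st.2.2)

def recamanSequence (N : Int) : List Int × List Int :=
  if N ≤ 0 then ([], [])
  else
    let sequence := PySem.List.pySetD (List.replicate N.toNat (0 : Int)) 0 1
    let st := (PySem.List.pyRange 2 (N + 1) 1).foldl stepA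
      (sequence, PySem.Set.ofList [1], PySem.Set.empty)
    (st.1, st.2.2)

-- ===== PORT B =====
-- generation loop body of B: state = (sequence, seen, prev)
def stepB (st : List Int × PySem.Set Int × Int) (n : Int) :
    List Int × PySem.Set Int × Int :=
  let cand := st.2.2 - n
  let prev :=
    if cand > 0 ∧ ¬ (PySem.Set.contains st.2.1 cand = true) then cand else st.2.2 + n
  (st.1 ++ [prev], PySem.Set.add st.2.1 prev, prev)

-- tally loop body of B: state = (counts, repeated)
def stepT (st : PySem.Dict Int Int × PySem.Set Int) (v : Int) :
    PySem.Dict Int Int × PySem.Set Int :=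
  let c := st.1.getD v 0 + 1
  (st.1.insert v c, if c = 2 then PySem.Set.add st.2 v else st.2)

def recamanSequence_alt (N : Int) : List Int × List Int :=
  if N ≤ 0 then ([], [])
  else
    let g := (PySem.List.pyRange 2 (N + 1) 1).foldl stepB
      ([1], PySem.Set.ofList [1], 1)
    let t := g.1.foldl stepT (PySem.Dict.empty, PySem.Set.empty)
    (g.1, t.2)

-- ===== PRECONDITION & SPEC =====
def Spec_recamanSequence (N : Int) (out : List Int × List Int) : Prop := out = recamanSequence_alt N
instance (N : Int) (out : List Int × List Int) : Decidable (Spec_recamanSequence N out) := by unfold Spec_recamanSequence; infer_instance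

-- ===== CLAIM (what is proved, stated in full; the proofs are below) =====
def Claim_equal_recamanSequence : Prop := ∀ (N : Int), Dom_recamanSequence N → Spec_recamanSequence N (recamanSequence N)

-- ===== LEMMAS AND PROOFS =====

-- proof-only helper: A's fused (seen, repeated) update for one freshly generated value
def stepF (st : PySem.Set Int × PySem.Set Int) (v : Int) : PySem.Set Int × PySem.Set Int :=
  (PySem.Set.add st.1 v,
    if PySem.Set.contains st.1 v = true then PySem.Set.add st.2 v else st.2)

theorem pyGetD_last_append (acc z : List Int) (x d : Int) (h : acc.getLast? = some x) :
    PySem.List.pyGetD (acc ++ z) ((acc.length : Int) - 1) d = x := by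
  have hne : acc ≠ [] := by rintro rfl; simp at h
  have hlen : 1 ≤ acc.length := List.length_pos_iff.mpr hne
  rw [PySem.List.pyGetD_eq_getElem (acc ++ z) d (by omega) (by simp only [List.length_append]; push_cast; omega)]
  have ht : (((acc.length : Int) - 1)).toNat = acc.length - 1 := by omega
  simp only [ht]
  rw [List.getElem_append_left (by omega)]
  rw [← List.getLast_eq_getElem hne]
  rw [List.getLast?_eq_some_getLast hne] at h
  exact (Option.some_inj.mp h)

theorem pySetD_append_replicate (acc : List Int) (k : Nat) (v : Int) :
    PySem.List.pySetD (acc ++ List.replicate (k + 1) 0) ((acc.length : Int)) v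
      = (acc ++ [v]) ++ List.replicate k 0 := by
  rw [PySem.List.pySetD_natCast]
  simp [List.replicate_succ]

theorem pyGetD_mid_append (acc z : List Int) (v d : Int) :
    PySem.List.pyGetD ((acc ++ [v]) ++ z) ((acc.length : Int)) d = v := by
  rw [List.append_assoc, PySem.List.pyGetD_natCast]
  simp

theorem loopAB (b : Int) (k : Nat) : ∀ (n : Int), n ≤ b → (b - n).toNat = k →
    ∀ (acc : List Int) (x : Int) (seen rep : PySem.Set Int),
      acc ≠ [] → (acc.length : Int) = n - 1 → acc.getLast? = some x →
      ∃ (new : List Int) (prev' : Int),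
        (PySem.List.pyRange n b 1).foldl stepB (acc, seen, x)
          = (acc ++ new, (new.foldl stepF (seen, rep)).1, prev')
        ∧ (acc ++ new).getLast? = some prev'
        ∧ (PySem.List.pyRange n b 1).foldl stepA (acc ++ List.replicate k 0, seen, rep)
          = (acc ++ new, new.foldl stepF (seen, rep)) := by
  induction k with
  | zero =>
    intro n hnb hk acc x seen rep hne hlen hlast
    rw [PySem.List.pyRange_one_eq_nil (by omega)]
    exact ⟨[], x, by simp, by simpa using hlast, by simp⟩
  | succ k ih =>
    intro n hnb hk acc x seen rep hne hlen hlast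
    rw [PySem.List.pyRange_one_cons (by omega)]
    simp only [List.foldl_cons]
    set v := if x - n > 0 ∧ ¬ (PySem.Set.contains seen (x - n) = true) then x - n else x + n with hv
    have hB : stepB (acc, seen, x) n = (acc ++ [v], PySem.Set.add seen v, v) := by
      simp only [stepB, hv]
    have hget : PySem.List.pyGetD (acc ++ List.replicate (k + 1) 0) (n - 2) 0 = x := by
      have h2 : n - 2 = (acc.length : Int) - 1 := by omega
      rw [h2]; exact pyGetD_last_append _ _ _ _ hlast
    have hn1 : n - 1 = (acc.length : Int) := by omega
    have hA : stepA (acc ++ List.replicate (k + 1) 0, seen, rep) n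
        = ((acc ++ [v]) ++ List.replicate k 0, PySem.Set.add seen v,
           if PySem.Set.contains seen v = true then PySem.Set.add rep v else rep) := by
      simp only [stepA, hget, hn1]
      by_cases hc : x - n > 0 ∧ ¬ (PySem.Set.contains seen (x - n) = true)
      · rw [if_pos hc, pySetD_append_replicate, pyGetD_mid_append]
        rw [hv, if_pos hc]
      · rw [if_neg hc, pySetD_append_replicate, pyGetD_mid_append]
        rw [hv, if_neg hc]
    rw [hB, hA]
    obtain ⟨new, prev', h1, h2, h3⟩ := ih (n + 1) (by omega) (by omega) (acc ++ [v]) v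
      (PySem.Set.add seen v)
      (if PySem.Set.contains seen v = true then PySem.Set.add rep v else rep)
      (by simp) (by simp only [List.length_append, List.length_cons, List.length_nil]; push_cast; omega)
      (by simp)
    refine ⟨v :: new, prev', ?_, ?_, ?_⟩
    · rw [h1]; simp [stepF, List.append_assoc]
    · simpa using h2
    · rw [h3]; simp [stepF, List.append_assoc]

theorem tally_inv : ∀ (xs : List Int) (counts : PySem.Dict Int Int) (seen rep : PySem.Set Int),
    (∀ v, 0 ≤ counts.getD v 0) →
    (∀ v, PySem.Set.contains seen v = true ↔ 1 ≤ counts.getD v 0) →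
    (∀ v, v ∈ rep ↔ 2 ≤ counts.getD v 0) →
    (xs.foldl stepT (counts, rep)).2 = (xs.foldl stepF (seen, rep)).2 := by
  intro xs
  induction xs with
  | nil => intro counts seen rep _ _ _; rfl
  | cons v xs ih =>
    intro counts seen rep hpos hseen hrep
    simp only [List.foldl_cons, stepT, stepF]
    have hc0 := hpos v
    have hrepeq : (if counts.getD v 0 + 1 = 2 then PySem.Set.add rep v else rep)
        = (if PySem.Set.contains seen v = true then PySem.Set.add rep v else rep) := by
      by_cases h1 : 1 ≤ counts.getD v 0
      · rw [if_pos ((hseen v).mpr h1)]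
        by_cases h2 : 2 ≤ counts.getD v 0
        · rw [if_neg (by omega)]
          have hm : v ∈ rep := (hrep v).mpr h2
          have hadd : PySem.Set.add rep v = rep := by simp [PySem.Set.add, hm]
          rw [hadd]
        · rw [if_pos (by omega)]
      · have hnot : ¬ (PySem.Set.contains seen v = true) := fun hs => h1 ((hseen v).mp hs)
        rw [if_neg (by omega), if_neg hnot]
    rw [hrepeq]
    exact ih (counts.insert v (counts.getD v 0 + 1)) (PySem.Set.add seen v) _
      (by intro w
          rw [PySem.Dict.getD_insert]
          split_ifs with h
          · have := hpos v; omega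
          · exact hpos w)
      (by intro w
          rw [PySem.Dict.getD_insert]
          by_cases hw : w = v
          · subst hw
            simp [PySem.Set.mem_add]
            omega
          · rw [if_neg hw]
            rw [PySem.Set.contains_iff, PySem.Set.mem_add, ← PySem.Set.contains_iff, hseen w]
            simp [hw])
      (by intro w
          rw [PySem.Dict.getD_insert]
          by_cases hw : w = v
          · subst hw
            rw [if_pos rfl]
            by_cases hs : PySem.Set.contains seen w = true
            · have h1 := (hseen w).mp hs
              simp only [if_pos hs]
              simp [PySem.Set.mem_add]
              omega
            · simp only [if_neg hs]
              rw [hrep w]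
              have : ¬ 1 ≤ counts.getD w 0 := by rw [← hseen w]; exact hs
              omega
          · rw [if_neg hw]
            split_ifs with hs
            · rw [PySem.Set.mem_add]
              simp [hw, hrep w]
            · exact hrep w)

-- ===== VERDICT (by name: the statement is the Claim_ definition above) =====
theorem recamanSequence_spec : Claim_equal_recamanSequence := by
  intro N _
  show recamanSequence N = recamanSequence_alt N
  unfold recamanSequence recamanSequence_alt
  by_cases hN : N ≤ 0
  · rw [if_pos hN, if_pos hN]
  · rw [if_neg hN, if_neg hN]
    have hseq0 : PySem.List.pySetD (List.replicate N.toNat (0 : Int)) 0 1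
        = [1] ++ List.replicate (N.toNat - 1) 0 := by
      have h0 : (0 : Int) = ((0 : Nat) : Int) := rfl
      rw [h0, PySem.List.pySetD_natCast]
      obtain ⟨m, hm⟩ : ∃ m, N.toNat = m + 1 := ⟨N.toNat - 1, by omega⟩
      rw [hm]
      simp [List.replicate_succ]
    obtain ⟨new, prev', h1, _, h3⟩ := loopAB (N + 1) (N.toNat - 1) 2 (by omega) (by omega)
      [1] 1 (PySem.Set.ofList [1]) PySem.Set.empty (by simp) (by simp) (by simp)
    dsimp only
    rw [hseq0, h3, h1]
    have hstep1 : stepF (PySem.Set.empty, PySem.Set.empty) 1 = (PySem.Set.ofList [1], PySem.Set.empty) := by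
      decide
    have htal : (([1] ++ new).foldl stepT (PySem.Dict.empty, PySem.Set.empty)).2
        = (new.foldl stepF (PySem.Set.ofList [1], PySem.Set.empty)).2 := by
      rw [tally_inv ([1] ++ new) PySem.Dict.empty PySem.Set.empty PySem.Set.empty
        (by intro w; rw [PySem.Dict.getD_empty])
        (by intro w; simp [PySem.Dict.getD_empty, PySem.Set.empty])
        (by intro w; simp [PySem.Dict.getD_empty, PySem.Set.empty])]
      simp only [List.cons_append, List.nil_append, List.foldl_cons, hstep1]
    dsimp only
    rw [htal]
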